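-- pv_equiv track=rewrite | github.com/hlya23dd/Code_evaluation_Container | AR_v160_svm.py | get_feature_mask
-- ===== SOURCE A (Python) =====
-- num_channel = 16
--
-- def get_feature_mask(feature_select,time_delay,dim_feature_channelwise):
--
--     mask=[]
--     for channel in range(num_channel):
--       if ('E' in feature_select):
--          mask.append(1)  # err
--          mask.append(1)  # err
--       elif ('e' in feature_select):
--          mask.append(1)  # err
--          mask.append(0)  # err
--       else:
--          mask.append(0)  # err
--          mask.append(0)  # err
--       if ('c' in feature_select):
--          for dd in range(2,2+time_delay):
--              mask.append(1)  # coeffs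
--       else:
--          for dd in range(2,2+time_delay):
--              mask.append(0)  # coeffs
--       if ('p' in feature_select):
--          for dd in range(2+time_delay,7+time_delay):
--              mask.append(1)  # ps
--       else:
--          for dd in range(2+time_delay,7+time_delay):
--              mask.append(0)  # ps
--       if ('Y' in feature_select):
--          for dd in range(7+time_delay,dim_feature_channelwise):
--              mask.append(1)  # y-statistics
--       elif ('y' in feature_select):
--          mask.append(0)  # err
--          mask.append(0)  #
--          mask.append(1)  #
--          mask.append(1)  # err
--       else:
--          for dd in range(7+time_delay,dim_feature_channelwise):
--              mask.append(0)  # y-statistics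
--     return mask
-- ===== SOURCE B (Python) =====
-- num_channel = 16
--
-- def get_feature_mask(feature_select, time_delay, dim_feature_channelwise):
--     # closed-form: compute the per-channel length L, then decide each global
--     # position's value arithmetically from its offset i % L within the channel
--     c1 = time_delay if time_delay > 0 else 0
--     if 'Y' not in feature_select and 'y' in feature_select:
--         tail = 4
--     else:
--         t = dim_feature_channelwise - (7 + time_delay)
--         tail = t if t > 0 else 0
--     L = 7 + c1 + tail
--     def val(j):
--         if j < 2:
--             return 1 if ('E' in feature_select or ('e' in feature_select and j == 0)) else 0
--         if j < 2 + c1: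
--             return 1 if 'c' in feature_select else 0
--         if j < 7 + c1:
--             return 1 if 'p' in feature_select else 0
--         if 'Y' in feature_select:
--             return 1
--         if 'y' in feature_select:
--             return 1 if j - (7 + c1) >= 2 else 0
--         return 0
--     return [val(i % L) for i in range(num_channel * L)]
-- ===== Notes on version B (the rewrite author's own statement) =====
-- stated objective: alternative
-- what changed: B replaces A's append-driven outer loop and inner range loops by a closed-form position function: it computes the per-channel length L arithmetically and produces the whole mask as [val(i % L) for i in range(16*L)], deciding each entry from its offset instead of building segments.
import Mathlib
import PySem

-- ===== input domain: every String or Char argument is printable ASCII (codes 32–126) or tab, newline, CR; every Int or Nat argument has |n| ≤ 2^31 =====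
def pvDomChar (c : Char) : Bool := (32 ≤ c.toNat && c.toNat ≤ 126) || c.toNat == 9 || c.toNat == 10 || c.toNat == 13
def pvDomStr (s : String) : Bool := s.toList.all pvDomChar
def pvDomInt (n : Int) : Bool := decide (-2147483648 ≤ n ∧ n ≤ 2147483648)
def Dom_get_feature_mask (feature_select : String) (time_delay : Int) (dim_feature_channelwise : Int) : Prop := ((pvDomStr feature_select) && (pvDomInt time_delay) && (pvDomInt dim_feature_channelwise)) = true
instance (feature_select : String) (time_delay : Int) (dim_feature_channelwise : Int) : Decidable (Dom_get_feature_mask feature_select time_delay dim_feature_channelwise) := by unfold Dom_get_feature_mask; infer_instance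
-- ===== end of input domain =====

-- B replaces A's append-driven loops by a closed-form position function: it computes the
-- per-channel length L and maps an arithmetic value function over i % L for all 16*L positions
-- (objective: alternative — structurally different, same cost).

-- ===== PORT A =====
-- literal transliteration: outer loop over range(16); each branch/loop appends to the accumulator
-- (Python's list.append is modeled by Array.push; the loop/branch structure is A's, step for step)
def pvChannelBody (feature_select : String) (time_delay : Int) (dim_feature_channelwise : Int)
    (mask : Array Int) : Array Int :=
  let mask :=
    if PySem.Str.isIn "E" feature_select then (mask.push 1).push 1
    else if PySem.Str.isIn "e" feature_select then (mask.push 1).push 0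
    else (mask.push 0).push 0
  let mask :=
    if PySem.Str.isIn "c" feature_select then
      (PySem.List.pyRange 2 (2 + time_delay) 1).foldl (fun m _dd => m.push 1) mask
    else
      (PySem.List.pyRange 2 (2 + time_delay) 1).foldl (fun m _dd => m.push 0) mask
  let mask :=
    if PySem.Str.isIn "p" feature_select then
      (PySem.List.pyRange (2 + time_delay) (7 + time_delay) 1).foldl (fun m _dd => m.push 1) mask
    else
      (PySem.List.pyRange (2 + time_delay) (7 + time_delay) 1).foldl (fun m _dd => m.push 0) mask
  let mask :=
    if PySem.Str.isIn "Y" feature_select then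
      (PySem.List.pyRange (7 + time_delay) dim_feature_channelwise 1).foldl (fun m _dd => m.push 1) mask
    else if PySem.Str.isIn "y" feature_select then
      (((mask.push 0).push 0).push 1).push 1
    else
      (PySem.List.pyRange (7 + time_delay) dim_feature_channelwise 1).foldl (fun m _dd => m.push 0) mask
  mask

def get_feature_mask (feature_select : String) (time_delay : Int) (dim_feature_channelwise : Int) : List Int :=
  ((PySem.List.pyRange 0 16 1).foldl
    (fun mask _channel => pvChannelBody feature_select time_delay dim_feature_channelwise mask)
    #[]).toList

-- ===== PORT B =====
-- helpers mirror Source B's local bindings c1, tail and the nested function val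
def pvC1 (time_delay : Int) : Int := if time_delay > 0 then time_delay else 0

def pvTailLen (feature_select : String) (time_delay : Int) (dim_feature_channelwise : Int) : Int :=
  if !(PySem.Str.isIn "Y" feature_select) && PySem.Str.isIn "y" feature_select then 4
  else
    let t := dim_feature_channelwise - (7 + time_delay)
    if t > 0 then t else 0

def pvVal (feature_select : String) (c1 : Int) (j : Int) : Int :=
  if j < 2 then
    (if PySem.Str.isIn "E" feature_select || (PySem.Str.isIn "e" feature_select && j == 0) then 1 else 0)
  else if j < 2 + c1 then (if PySem.Str.isIn "c" feature_select then 1 else 0)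
  else if j < 7 + c1 then (if PySem.Str.isIn "p" feature_select then 1 else 0)
  else if PySem.Str.isIn "Y" feature_select then 1
  else if PySem.Str.isIn "y" feature_select then (if j - (7 + c1) ≥ 2 then 1 else 0)
  else 0

def get_feature_mask_alt (feature_select : String) (time_delay : Int) (dim_feature_channelwise : Int) : List Int :=
  let c1 := pvC1 time_delay
  let tail := pvTailLen feature_select time_delay dim_feature_channelwise
  let L := 7 + c1 + tail
  (PySem.List.pyRange 0 (16 * L) 1).map (fun i => pvVal feature_select c1 (PySem.Int.mod i L))

-- ===== PRECONDITION & SPEC =====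
def Spec_get_feature_mask (feature_select : String) (time_delay : Int) (dim_feature_channelwise : Int) (out : List Int) : Prop := out = get_feature_mask_alt feature_select time_delay dim_feature_channelwise
instance (feature_select : String) (time_delay : Int) (dim_feature_channelwise : Int) (out : List Int) : Decidable (Spec_get_feature_mask feature_select time_delay dim_feature_channelwise out) := by unfold Spec_get_feature_mask; infer_instance

-- ===== CLAIM =====
def Claim_equal_get_feature_mask : Prop := ∀ (feature_select : String) (time_delay : Int) (dim_feature_channelwise : Int), Dom_get_feature_mask feature_select time_delay dim_feature_channelwise → Spec_get_feature_mask feature_select time_delay dim_feature_channelwise (get_feature_mask feature_select time_delay dim_feature_channelwise)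

-- ===== LEMMAS AND PROOFS =====

-- the common per-channel pattern both programs produce, used only by the proofs
def pvPattern (feature_select : String) (time_delay : Int) (dim_feature_channelwise : Int) : List Int :=
  (if PySem.Str.isIn "E" feature_select then [1, 1]
   else if PySem.Str.isIn "e" feature_select then [1, 0]
   else [0, 0])
  ++ List.replicate time_delay.toNat (if PySem.Str.isIn "c" feature_select then 1 else 0)
  ++ List.replicate 5 (if PySem.Str.isIn "p" feature_select then 1 else 0)
  ++ (if PySem.Str.isIn "Y" feature_select then
        List.replicate (dim_feature_channelwise - (7 + time_delay)).toNat (1 : Int)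
      else if PySem.Str.isIn "y" feature_select then [0, 0, 1, 1]
      else List.replicate (dim_feature_channelwise - (7 + time_delay)).toNat (0 : Int))

-- one iteration of A's outer loop appends exactly the per-channel pattern
lemma pv_body_eq (feature_select : String) (time_delay dim_feature_channelwise : Int)
    (m : Array Int) :
    (pvChannelBody feature_select time_delay dim_feature_channelwise m).toList
    = m.toList ++ pvPattern feature_select time_delay dim_feature_channelwise := by
  unfold pvChannelBody pvPattern
  have hlen1 : (PySem.List.pyRange 2 (2 + time_delay) 1).length = time_delay.toNat := by
    rw [PySem.List.length_pyRange_one]; omega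
  have hlen2 : (PySem.List.pyRange (2 + time_delay) (7 + time_delay) 1).length = 5 := by
    rw [PySem.List.length_pyRange_one]; omega
  have hlen3 : (PySem.List.pyRange (7 + time_delay) dim_feature_channelwise 1).length
      = (dim_feature_channelwise - (7 + time_delay)).toNat := by
    rw [PySem.List.length_pyRange_one]
  split_ifs <;>
    simp [hlen1, hlen2, hlen3, List.append_assoc]

lemma pv_A_eq (feature_select : String) (time_delay dim_feature_channelwise : Int) :
    get_feature_mask feature_select time_delay dim_feature_channelwise
    = (List.replicate 16 (pvPattern feature_select time_delay dim_feature_channelwise)).flatten := by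
  unfold get_feature_mask
  have hr : PySem.List.pyRange 0 16 1
      = [0,1,2,3,4,5,6,7,8,9,10,11,12,13,14,15] := by decide
  rw [hr]
  simp only [List.foldl, pv_body_eq]
  simp [List.replicate, List.append_assoc]

-- splitting the index comprehension into equal channels: i % L is periodic
lemma pv_map_mod_range (f : Int → Int) (L : Int) (hL : 0 < L) (n : ℕ) :
    (PySem.List.pyRange 0 ((n : Int) * L) 1).map (fun i => f (PySem.Int.mod i L))
    = (List.replicate n ((PySem.List.pyRange 0 L 1).map f)).flatten := by
  induction n with
  | zero => simp [PySem.List.pyRange_one_eq_nil]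
  | succ n ih =>
    have hcast : ((n + 1 : ℕ) : Int) * L = (n : Int) * L + L := by push_cast; ring
    have h0 : (0 : Int) ≤ (n : Int) * L := by positivity
    have h1 : (n : Int) * L ≤ (n : Int) * L + L := by omega
    rw [hcast, PySem.List.pyRange_one_append 0 ((n : Int) * L) ((n : Int) * L + L) h0 h1,
        List.map_append, ih, List.replicate_succ', List.flatten_append]
    congr 1
    simp only [List.flatten_cons, List.flatten_nil, List.append_nil]
    rw [PySem.List.pyRange_one ((n : Int) * L) ((n : Int) * L + L),
        PySem.List.pyRange_one 0 L]
    have hd : ((n : Int) * L + L - (n : Int) * L).toNat = (L - 0).toNat := by omega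
    rw [hd]
    rw [List.map_map, List.map_map]
    apply List.map_congr_left
    intro k hk
    have hkL : (k : Int) < L := by
      have := List.mem_range.mp hk; omega
    simp only [Function.comp]
    have hmod : PySem.Int.mod ((n : Int) * L + (k : Int)) L = (k : Int) := by
      rw [PySem.Int.mod_eq_emod_of_pos hL, Int.add_comm, mul_comm, Int.add_mul_emod_self_left,
          Int.emod_eq_of_lt (by positivity) hkL]
    rw [hmod]
    norm_num

-- one channel of B's comprehension is the per-channel pattern
lemma pv_chunk_eq (feature_select : String) (time_delay dim_feature_channelwise : Int) :
    (PySem.List.pyRange 0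
        (7 + pvC1 time_delay + pvTailLen feature_select time_delay dim_feature_channelwise) 1).map
      (pvVal feature_select (pvC1 time_delay))
    = pvPattern feature_select time_delay dim_feature_channelwise := by
  set c1 := pvC1 time_delay with hc1def
  set tl := pvTailLen feature_select time_delay dim_feature_channelwise with htldef
  have hc1 : 0 ≤ c1 := by rw [hc1def]; unfold pvC1; split_ifs <;> omega
  have hc1n : c1.toNat = time_delay.toNat := by rw [hc1def]; unfold pvC1; split_ifs <;> omega
  have htl : 0 ≤ tl := by
    rw [htldef]; unfold pvTailLen; dsimp only; split_ifs <;> omega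
  have hseg1 : (PySem.List.pyRange 0 2 1).map (pvVal feature_select c1)
      = (if PySem.Str.isIn "E" feature_select then [1, 1]
         else if PySem.Str.isIn "e" feature_select then [1, 0]
         else [0, 0]) := by
    have h2 : PySem.List.pyRange 0 2 1 = [0, 1] := by decide
    rw [h2]
    simp only [List.map_cons, List.map_nil, pvVal]
    by_cases hE : PySem.Str.isIn "E" feature_select = true
    · simp only [hE, Bool.true_or, if_pos]
      norm_num
    · by_cases he : PySem.Str.isIn "e" feature_select = true
      · simp only [hE, he, Bool.false_or, Bool.true_and]
        norm_num
      · simp only [hE, he, Bool.false_or, Bool.false_and]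
        norm_num
  have hseg2 : (PySem.List.pyRange 2 (2 + c1) 1).map (pvVal feature_select c1)
      = List.replicate time_delay.toNat (if PySem.Str.isIn "c" feature_select then 1 else 0) := by
    refine List.eq_replicate_iff.mpr ⟨?_, ?_⟩
    · rw [List.length_map, PySem.List.length_pyRange_one]; omega
    · intro b hb
      obtain ⟨j, hj, rfl⟩ := List.mem_map.mp hb
      have hjr := (PySem.List.mem_pyRange_one).mp hj
      simp only [pvVal]
      rw [if_neg (by omega), if_pos (by omega)]
  have hseg3 : (PySem.List.pyRange (2 + c1) (7 + c1) 1).map (pvVal feature_select c1)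
      = List.replicate 5 (if PySem.Str.isIn "p" feature_select then 1 else 0) := by
    refine List.eq_replicate_iff.mpr ⟨?_, ?_⟩
    · rw [List.length_map, PySem.List.length_pyRange_one]; omega
    · intro b hb
      obtain ⟨j, hj, rfl⟩ := List.mem_map.mp hb
      have hjr := (PySem.List.mem_pyRange_one).mp hj
      simp only [pvVal]
      rw [if_neg (by omega), if_neg (by omega), if_pos (by omega)]
  have hseg4 : (PySem.List.pyRange (7 + c1) (7 + c1 + tl) 1).map (pvVal feature_select c1)
      = (if PySem.Str.isIn "Y" feature_select then
           List.replicate (dim_feature_channelwise - (7 + time_delay)).toNat (1 : Int)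
         else if PySem.Str.isIn "y" feature_select then [0, 0, 1, 1]
         else List.replicate (dim_feature_channelwise - (7 + time_delay)).toNat (0 : Int)) := by
    by_cases hY : PySem.Str.isIn "Y" feature_select = true
    · rw [if_pos hY]
      have htnat : tl.toNat = (dim_feature_channelwise - (7 + time_delay)).toNat := by
        rw [htldef]; unfold pvTailLen
        rw [if_neg (by simp only [hY, Bool.not_true, Bool.false_and]; exact Bool.false_ne_true)]
        dsimp only; split_ifs <;> omega
      refine List.eq_replicate_iff.mpr ⟨?_, ?_⟩
      · rw [List.length_map, PySem.List.length_pyRange_one, ← htnat]; omega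
      · intro b hb
        obtain ⟨j, hj, rfl⟩ := List.mem_map.mp hb
        have hjr := (PySem.List.mem_pyRange_one).mp hj
        simp only [pvVal]
        rw [if_neg (by omega), if_neg (by omega), if_neg (by omega), if_pos hY]
    · rw [if_neg hY]
      by_cases hy : PySem.Str.isIn "y" feature_select = true
      · rw [if_pos hy]
        have htl4 : tl = 4 := by
          rw [htldef]; unfold pvTailLen
          rw [if_pos (by simp only [Bool.and_eq_true, Bool.not_eq_true']
                         exact ⟨Bool.not_eq_true _ ▸ (Bool.eq_false_iff.mpr (fun h => hY h)) , hy⟩)]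
        rw [htl4]
        have h4 : PySem.List.pyRange (7 + c1) (7 + c1 + 4) 1
            = [7 + c1, 7 + c1 + 1, 7 + c1 + 2, 7 + c1 + 3] := by
          rw [PySem.List.pyRange_one_cons (by omega), PySem.List.pyRange_one_cons (by omega),
              PySem.List.pyRange_one_cons (by omega), PySem.List.pyRange_one_cons (by omega),
              PySem.List.pyRange_one_eq_nil (by omega)]
          norm_num
          omega
        rw [h4]
        simp only [List.map_cons, List.map_nil, pvVal]
        rw [if_neg (by omega), if_neg (by omega), if_neg (by omega), if_neg hY, if_pos hy,
            if_neg (by omega)]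
        rw [if_neg (by omega), if_neg (by omega), if_neg (by omega), if_neg hY, if_pos hy,
            if_neg (by omega)]
        rw [if_neg (by omega), if_neg (by omega), if_neg (by omega), if_neg hY, if_pos hy,
            if_pos (by omega)]
        rw [if_neg (by omega), if_neg (by omega), if_neg (by omega), if_neg hY, if_pos hy,
            if_pos (by omega)]
      · rw [if_neg hy]
        have htnat : tl.toNat = (dim_feature_channelwise - (7 + time_delay)).toNat := by
          rw [htldef]; unfold pvTailLen
          rw [if_neg (by simp only [Bool.and_eq_true]; rintro ⟨-, h⟩; exact hy h)]
          dsimp only; split_ifs <;> omega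
        refine List.eq_replicate_iff.mpr ⟨?_, ?_⟩
        · rw [List.length_map, PySem.List.length_pyRange_one, ← htnat]; omega
        · intro b hb
          obtain ⟨j, hj, rfl⟩ := List.mem_map.mp hb
          have hjr := (PySem.List.mem_pyRange_one).mp hj
          simp only [pvVal]
          rw [if_neg (by omega), if_neg (by omega), if_neg (by omega), if_neg hY, if_neg hy]
  rw [PySem.List.pyRange_one_append 0 2 (7 + c1 + tl) (by omega) (by omega),
      PySem.List.pyRange_one_append 2 (2 + c1) (7 + c1 + tl) (by omega) (by omega),
      show (7 + c1 + tl) = (7 + c1) + tl by ring] at *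
  rw [PySem.List.pyRange_one_append (2 + c1) (7 + c1) ((7 + c1) + tl) (by omega) (by omega),
      List.map_append, List.map_append, List.map_append, hseg1, hseg2, hseg3, hseg4]
  unfold pvPattern
  simp [List.append_assoc]

lemma pv_B_eq (feature_select : String) (time_delay dim_feature_channelwise : Int) :
    get_feature_mask_alt feature_select time_delay dim_feature_channelwise
    = (List.replicate 16 (pvPattern feature_select time_delay dim_feature_channelwise)).flatten := by
  unfold get_feature_mask_alt
  dsimp only
  set c1 := pvC1 time_delay with hc1def
  set tl := pvTailLen feature_select time_delay dim_feature_channelwise with htldef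
  have hc1 : 0 ≤ c1 := by rw [hc1def]; unfold pvC1; split_ifs <;> omega
  have htl : 0 ≤ tl := by
    rw [htldef]; unfold pvTailLen; dsimp only; split_ifs <;> omega
  have hL : 0 < 7 + c1 + tl := by omega
  have h16 : (16 : Int) * (7 + c1 + tl) = ((16 : ℕ) : Int) * (7 + c1 + tl) := by norm_num
  rw [h16, pv_map_mod_range _ _ hL 16, pv_chunk_eq]

-- ===== VERDICT =====
theorem get_feature_mask_spec : Claim_equal_get_feature_mask := by
  intro fs td dim _
  show get_feature_mask fs td dim = get_feature_mask_alt fs td dim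
  rw [pv_A_eq, pv_B_eq]
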